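-- pv_equiv track=rewrite | github.com/renjieliu/leetcode | 1001_1499/1418.py | displayTable
-- ===== SOURCE A (Python) =====
-- def displayTable(orders: 'List[List[str]]') -> 'List[List[str]]':
--     hmp_food = {}
--     hmp_table = {}
--     for customer, table, food in orders:
--         if food not in hmp_food:
--             hmp_food[food] = {}
--         if table not in hmp_food[food]:
--             hmp_food[food][table] = 0
--         if table not in hmp_table:
--             hmp_table[table] = {}
--         if food not in hmp_table[table]:
--             hmp_table[table][food] = 0
--         hmp_food[food][table] += 1
--         hmp_table[table][food] += 1
--
--     output = []
--     output.append(["Table"] + sorted(hmp_food.keys()))  # add the food name to the title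
--     for i, c in enumerate(sorted(hmp_table.keys(), key=lambda x: int(x))):
--         output.append([str(c)])
--         for f in output[0][1:]:  # go thru the food
--             if f not in hmp_table[c]:
--                 output[-1].append("0")
--             else:
--                 output[-1].append(str(hmp_table[c][f]))
--     return output
-- ===== SOURCE B (Python) =====
-- def displayTable(orders):
--     # Count-free approach: group each table's foods, then sort and merge-count
--     # against the globally sorted food list with a single advancing pointer.
--     foods = sorted({f for _, t, f in orders})
--     tables = []
--     per_table = {}
--     for _, t, f in orders:
--         if t not in per_table:
--             per_table[t] = []
--             tables.append(t)
--         per_table[t].append(f)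
--     tables.sort(key=int)
--     result = [["Table"] + foods]
--     for t in tables:
--         fs = sorted(per_table[t])
--         row = [t]
--         i = 0
--         for food in foods:
--             c = 0
--             while i < len(fs) and fs[i] == food:
--                 c += 1
--                 i += 1
--             row.append(str(c))
--         result.append(row)
--     return result
-- ===== Notes on version B (the rewrite author's own statement) =====
-- stated objective: alternative
-- what changed: B counts nothing with dicts: it groups each table's food strings into a list, sorts each group and the distinct-food list, and produces every row by a single-pointer merge over the two sorted lists (run-length counting), where A maintains two nested counting dicts with membership-initialisation guards and renders cells by dict lookup.
import Mathlib
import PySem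

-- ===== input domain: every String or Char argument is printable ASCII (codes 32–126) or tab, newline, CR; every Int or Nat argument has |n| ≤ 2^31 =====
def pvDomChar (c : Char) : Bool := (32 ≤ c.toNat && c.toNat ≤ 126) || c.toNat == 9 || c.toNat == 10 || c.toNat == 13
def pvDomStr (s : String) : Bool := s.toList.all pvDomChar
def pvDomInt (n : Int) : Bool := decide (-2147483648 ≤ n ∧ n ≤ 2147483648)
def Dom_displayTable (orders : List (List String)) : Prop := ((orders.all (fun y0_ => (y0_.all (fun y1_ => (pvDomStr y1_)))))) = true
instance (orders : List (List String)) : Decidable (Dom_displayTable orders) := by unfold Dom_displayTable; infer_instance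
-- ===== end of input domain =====

-- B replaces A's two nested counting dicts and their four membership guards by a count-free
-- algorithm: group each table's foods into a list, sort each group and the distinct-food list,
-- and emit every row by a single-pointer merge (run-length count) over the two sorted lists.

-- ===== PORT A =====
-- The sort key '(PySem.Int.ofStr? x).getD 0' models Python's int(x); inputs where int(x)
-- raises ValueError (and orders that do not unpack into 3 items) are excluded by Pre_.
def displayTable (orders : List (List String)) : List (List String) :=
  let st := orders.foldl
    (fun (st : PySem.Dict String (PySem.Dict String Int) × PySem.Dict String (PySem.Dict String Int)) order =>
      match order with
      | [_customer, table, food] =>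
        let hf := st.1
        let ht := st.2
        let hf := if hf.contains food then hf else hf.insert food PySem.Dict.empty
        let hf := if (hf.getD food PySem.Dict.empty).contains table then hf
                  else hf.insert food ((hf.getD food PySem.Dict.empty).insert table 0)
        let ht := if ht.contains table then ht else ht.insert table PySem.Dict.empty
        let ht := if (ht.getD table PySem.Dict.empty).contains food then ht
                  else ht.insert table ((ht.getD table PySem.Dict.empty).insert food 0)
        let hf := hf.insert food ((hf.getD food PySem.Dict.empty).insert table
                    ((hf.getD food PySem.Dict.empty).getD table 0 + 1))
        let ht := ht.insert table ((ht.getD table PySem.Dict.empty).insert food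
                    ((ht.getD table PySem.Dict.empty).getD food 0 + 1))
        (hf, ht)
      | _ => st)
    (PySem.Dict.empty, PySem.Dict.empty)
  let header := "Table" :: PySem.List.sorted st.1.keys (fun x => x) false
  let rows := (PySem.List.sorted st.2.keys (fun x => (PySem.Int.ofStr? x).getD 0) false).map
    (fun c => c :: header.tail.map (fun f =>
      match st.2.get? c with
      | none => "0"
      | some d => if d.contains f then PySem.Int.toStr (d.getD f 0) else "0"))
  header :: rows

-- ===== PORT B =====
-- Source B's inner 'for food in foods:' with the advancing index i over the sorted group fs:
-- the while-loop consumes the leading run of elements equal to food (takeWhile/dropWhile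
-- render the same pointer advance; exact since runs are contiguous prefixes of the remainder).
def pvMergeRow (foods fs : List String) : List String :=
  match foods with
  | [] => []
  | food :: rest =>
    let c := (fs.takeWhile (fun x => x == food)).length
    PySem.Int.toStr (c : Int) :: pvMergeRow rest (fs.dropWhile (fun x => x == food))

-- Source B's grouping loop body; the tuple unpacking '_, t, f = order' is hand-ported via
-- getD indexing (exact for 3-element orders; others raise ValueError, outside Pre_).
def pvGroupStep (st : PySem.Dict String (List String) × List String) (o : List String) :
    PySem.Dict String (List String) × List String :=
  let t := o.getD 1 ""
  let f := o.getD 2 ""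
  let st := if st.1.contains t then st else (st.1.insert t [], st.2 ++ [t])
  (st.1.insert t (st.1.getD t [] ++ [f]), st.2)

def displayTable_alt (orders : List (List String)) : List (List String) :=
  let foods := PySem.List.sorted (PySem.Set.ofList (orders.map (fun o => o.getD 2 ""))) (fun x => x) false
  let st := orders.foldl pvGroupStep (PySem.Dict.empty, [])
  let tables := PySem.List.sorted st.2 (fun x => (PySem.Int.ofStr? x).getD 0) false
  let rows := tables.map (fun t =>
    t :: pvMergeRow foods (PySem.List.sorted (st.1.getD t []) (fun x => x) false))
  ("Table" :: foods) :: rows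

-- ===== PRECONDITION & SPEC =====
-- Pre_ excludes exactly the inputs on which Python A raises: an order that does not unpack
-- into 3 items (ValueError) or whose table string is not int()-parseable (ValueError in the sort key).
def Pre_displayTable (orders : List (List String)) : Prop :=
  (orders.all (fun o => o.length == 3 && (PySem.Int.ofStr? (o.getD 1 "")).isSome)) = true
instance (orders : List (List String)) : Decidable (Pre_displayTable orders) := by
  unfold Pre_displayTable; infer_instance

def pvWitness_displayTable : List (List String) :=
  [["Alice", "3", "Beef"], ["Bob", "12", "Soup"], ["Carl", "3", "Soup"]]

def Spec_displayTable (orders : List (List String)) (out : List (List String)) : Prop := out = displayTable_alt orders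
instance (orders : List (List String)) (out : List (List String)) : Decidable (Spec_displayTable orders out) := by unfold Spec_displayTable; infer_instance

-- ===== CLAIM (what is proved, stated in full; the proofs are below) =====
def Claim_equal_displayTable : Prop := ∀ (orders : List (List String)), Dom_displayTable orders → Pre_displayTable orders → Spec_displayTable orders (displayTable orders)

-- ===== LEMMAS AND PROOFS =====

-- ---- proof-only helpers: the projected (table, food) pairs, and named stages of A's loop body ----

def pvPairsOf (orders : List (List String)) : List (String × String) :=
  orders.filterMap (fun o => match o with | [_c, t, f] => some (t, f) | _ => none)

-- stages of A's food-dict update (p = (table, food))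
def pvF1 (hf : PySem.Dict String (PySem.Dict String Int)) (p : String × String) :
    PySem.Dict String (PySem.Dict String Int) :=
  if hf.contains p.2 then hf else hf.insert p.2 PySem.Dict.empty

def pvF2 (hf : PySem.Dict String (PySem.Dict String Int)) (p : String × String) :
    PySem.Dict String (PySem.Dict String Int) :=
  if ((pvF1 hf p).getD p.2 PySem.Dict.empty).contains p.1 then pvF1 hf p
  else (pvF1 hf p).insert p.2 (((pvF1 hf p).getD p.2 PySem.Dict.empty).insert p.1 0)

def pvStepAF (hf : PySem.Dict String (PySem.Dict String Int)) (p : String × String) :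
    PySem.Dict String (PySem.Dict String Int) :=
  (pvF2 hf p).insert p.2 (((pvF2 hf p).getD p.2 PySem.Dict.empty).insert p.1
    (((pvF2 hf p).getD p.2 PySem.Dict.empty).getD p.1 0 + 1))

-- stages of A's table-dict update
def pvG1 (ht : PySem.Dict String (PySem.Dict String Int)) (p : String × String) :
    PySem.Dict String (PySem.Dict String Int) :=
  if ht.contains p.1 then ht else ht.insert p.1 PySem.Dict.empty

def pvG2 (ht : PySem.Dict String (PySem.Dict String Int)) (p : String × String) :
    PySem.Dict String (PySem.Dict String Int) :=
  if ((pvG1 ht p).getD p.1 PySem.Dict.empty).contains p.2 then pvG1 ht p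
  else (pvG1 ht p).insert p.1 (((pvG1 ht p).getD p.1 PySem.Dict.empty).insert p.2 0)

def pvStepAT (ht : PySem.Dict String (PySem.Dict String Int)) (p : String × String) :
    PySem.Dict String (PySem.Dict String Int) :=
  (pvG2 ht p).insert p.1 (((pvG2 ht p).getD p.1 PySem.Dict.empty).insert p.2
    (((pvG2 ht p).getD p.1 PySem.Dict.empty).getD p.2 0 + 1))

-- B's grouping step on the projected pair (definitional core of pvGroupStep)
def pvGroupStepP (st : PySem.Dict String (List String) × List String) (p : String × String) :
    PySem.Dict String (List String) × List String :=
  let st := if st.1.contains p.1 then st else (st.1.insert p.1 [], st.2 ++ [p.1])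
  (st.1.insert p.1 (st.1.getD p.1 [] ++ [p.2]), st.2)

-- A's combined fold splits into two independent folds over the projected pairs
theorem pvFoldA (orders : List (List String))
    (hf ht : PySem.Dict String (PySem.Dict String Int)) :
    orders.foldl
      (fun (st : PySem.Dict String (PySem.Dict String Int) × PySem.Dict String (PySem.Dict String Int)) order =>
        match order with
        | [_customer, table, food] =>
          let hf := st.1
          let ht := st.2
          let hf := if hf.contains food then hf else hf.insert food PySem.Dict.empty
          let hf := if (hf.getD food PySem.Dict.empty).contains table then hf
                    else hf.insert food ((hf.getD food PySem.Dict.empty).insert table 0)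
          let ht := if ht.contains table then ht else ht.insert table PySem.Dict.empty
          let ht := if (ht.getD table PySem.Dict.empty).contains food then ht
                    else ht.insert table ((ht.getD table PySem.Dict.empty).insert food 0)
          let hf := hf.insert food ((hf.getD food PySem.Dict.empty).insert table
                      ((hf.getD food PySem.Dict.empty).getD table 0 + 1))
          let ht := ht.insert table ((ht.getD table PySem.Dict.empty).insert food
                      ((ht.getD table PySem.Dict.empty).getD food 0 + 1))
          (hf, ht)
        | _ => st)
      (hf, ht)
    = ((pvPairsOf orders).foldl pvStepAF hf, (pvPairsOf orders).foldl pvStepAT ht) := by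
  induction orders generalizing hf ht with
  | nil => rfl
  | cons o rest ih =>
    rcases o with _ | ⟨a, _ | ⟨b, _ | ⟨c, _ | ⟨d, l⟩⟩⟩⟩ <;>
      simp only [List.foldl_cons, pvPairsOf, List.filterMap_cons] <;>
      exact ih _ _

-- set-add of a dict's key list, phrased through Dict.contains
theorem pvSetAdd_keys_of_contains {ν : Type} (d : PySem.Dict String ν) (x : String)
    (h : d.contains x = true) : PySem.Set.add d.keys x = d.keys := by
  have hm : x ∈ d.keys := (PySem.Dict.contains_iff_mem_keys d x).1 h
  simp [PySem.Set.add, hm]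

theorem pvSetAdd_keys_of_not_contains {ν : Type} (d : PySem.Dict String ν) (x : String)
    (h : ¬ d.contains x = true) : PySem.Set.add d.keys x = d.keys ++ [x] := by
  have hm : ¬ x ∈ d.keys := fun hx => h ((PySem.Dict.contains_iff_mem_keys d x).2 hx)
  simp [PySem.Set.add, hm]

-- ---- properties of the table-side stages ----

theorem pvG1_contains_self (ht : PySem.Dict String (PySem.Dict String Int)) (p : String × String) :
    (pvG1 ht p).contains p.1 = true := by
  unfold pvG1
  by_cases h : ht.contains p.1
  · rw [if_pos h]; exact h
  · rw [if_neg h]; exact PySem.Dict.contains_insert_self _ _ _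

theorem pvG1_keys (ht : PySem.Dict String (PySem.Dict String Int)) (p : String × String) :
    (pvG1 ht p).keys = PySem.Set.add ht.keys p.1 := by
  unfold pvG1
  by_cases h : ht.contains p.1
  · rw [if_pos h, pvSetAdd_keys_of_contains _ _ h]
  · rw [if_neg h, PySem.Dict.keys_insert_of_not_contains _ _ (by simpa using h),
      pvSetAdd_keys_of_not_contains _ _ h]

theorem pvG1_getD_self (ht : PySem.Dict String (PySem.Dict String Int)) (p : String × String) :
    (pvG1 ht p).getD p.1 PySem.Dict.empty = ht.getD p.1 PySem.Dict.empty := by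
  unfold pvG1
  by_cases h : ht.contains p.1
  · rw [if_pos h]
  · rw [if_neg h, PySem.Dict.getD_insert_self,
      PySem.Dict.getD_of_not_contains _ _ (by simpa using h)]

theorem pvG1_getD_ne (ht : PySem.Dict String (PySem.Dict String Int)) (p : String × String)
    (t : String) (hT : ¬ t = p.1) :
    (pvG1 ht p).getD t PySem.Dict.empty = ht.getD t PySem.Dict.empty := by
  unfold pvG1
  by_cases h : ht.contains p.1
  · rw [if_pos h]
  · rw [if_neg h, PySem.Dict.getD_insert_of_ne _ _ _ hT]

theorem pvG2_contains_self (ht : PySem.Dict String (PySem.Dict String Int)) (p : String × String) :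
    (pvG2 ht p).contains p.1 = true := by
  unfold pvG2
  by_cases h3 : ((pvG1 ht p).getD p.1 PySem.Dict.empty).contains p.2
  · rw [if_pos h3]; exact pvG1_contains_self ht p
  · rw [if_neg h3]; exact PySem.Dict.contains_insert_self _ _ _

theorem pvG2_keys (ht : PySem.Dict String (PySem.Dict String Int)) (p : String × String) :
    (pvG2 ht p).keys = PySem.Set.add ht.keys p.1 := by
  unfold pvG2
  by_cases h3 : ((pvG1 ht p).getD p.1 PySem.Dict.empty).contains p.2
  · rw [if_pos h3, pvG1_keys]
  · rw [if_neg h3, PySem.Dict.keys_insert_of_contains _ _ (pvG1_contains_self ht p), pvG1_keys]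

theorem pvG2_getD_self (ht : PySem.Dict String (PySem.Dict String Int)) (p : String × String)
    (g : String) :
    ((pvG2 ht p).getD p.1 PySem.Dict.empty).getD g 0
      = (ht.getD p.1 PySem.Dict.empty).getD g 0 := by
  unfold pvG2
  by_cases h3 : ((pvG1 ht p).getD p.1 PySem.Dict.empty).contains p.2
  · rw [if_pos h3, pvG1_getD_self]
  · rw [if_neg h3, PySem.Dict.getD_insert_self]
    by_cases hg : g = p.2
    · subst hg
      rw [PySem.Dict.getD_insert_self, ← pvG1_getD_self ht p,
        PySem.Dict.getD_of_not_contains _ _ (by simpa using h3)]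
    · rw [PySem.Dict.getD_insert_of_ne _ _ _ hg, pvG1_getD_self]

theorem pvG2_getD_ne (ht : PySem.Dict String (PySem.Dict String Int)) (p : String × String)
    (t : String) (hT : ¬ t = p.1) :
    (pvG2 ht p).getD t PySem.Dict.empty = ht.getD t PySem.Dict.empty := by
  unfold pvG2
  by_cases h3 : ((pvG1 ht p).getD p.1 PySem.Dict.empty).contains p.2
  · rw [if_pos h3, pvG1_getD_ne _ _ _ hT]
  · rw [if_neg h3, PySem.Dict.getD_insert_of_ne _ _ _ hT, pvG1_getD_ne _ _ _ hT]

-- ---- properties of the food-side stages (only keys are ever consumed) ----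

theorem pvF1_contains_self (hf : PySem.Dict String (PySem.Dict String Int)) (p : String × String) :
    (pvF1 hf p).contains p.2 = true := by
  unfold pvF1
  by_cases h : hf.contains p.2
  · rw [if_pos h]; exact h
  · rw [if_neg h]; exact PySem.Dict.contains_insert_self _ _ _

theorem pvF1_keys (hf : PySem.Dict String (PySem.Dict String Int)) (p : String × String) :
    (pvF1 hf p).keys = PySem.Set.add hf.keys p.2 := by
  unfold pvF1
  by_cases h : hf.contains p.2
  · rw [if_pos h, pvSetAdd_keys_of_contains _ _ h]
  · rw [if_neg h, PySem.Dict.keys_insert_of_not_contains _ _ (by simpa using h),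
      pvSetAdd_keys_of_not_contains _ _ h]

theorem pvF2_contains_self (hf : PySem.Dict String (PySem.Dict String Int)) (p : String × String) :
    (pvF2 hf p).contains p.2 = true := by
  unfold pvF2
  by_cases h3 : ((pvF1 hf p).getD p.2 PySem.Dict.empty).contains p.1
  · rw [if_pos h3]; exact pvF1_contains_self hf p
  · rw [if_neg h3]; exact PySem.Dict.contains_insert_self _ _ _

theorem pvF2_keys (hf : PySem.Dict String (PySem.Dict String Int)) (p : String × String) :
    (pvF2 hf p).keys = PySem.Set.add hf.keys p.2 := by
  unfold pvF2
  by_cases h3 : ((pvF1 hf p).getD p.2 PySem.Dict.empty).contains p.1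
  · rw [if_pos h3, pvF1_keys]
  · rw [if_neg h3, PySem.Dict.keys_insert_of_contains _ _ (pvF1_contains_self hf p), pvF1_keys]

-- ---- step-level facts ----

theorem pvKeysStepAF (hf : PySem.Dict String (PySem.Dict String Int)) (p : String × String) :
    (pvStepAF hf p).keys = PySem.Set.add hf.keys p.2 := by
  unfold pvStepAF
  rw [PySem.Dict.keys_insert_of_contains _ _ (pvF2_contains_self hf p), pvF2_keys]

theorem pvKeysStepAT (ht : PySem.Dict String (PySem.Dict String Int)) (p : String × String) :
    (pvStepAT ht p).keys = PySem.Set.add ht.keys p.1 := by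
  unfold pvStepAT
  rw [PySem.Dict.keys_insert_of_contains _ _ (pvG2_contains_self ht p), pvG2_keys]

theorem pvCountStepAT (ht : PySem.Dict String (PySem.Dict String Int)) (p : String × String)
    (t f : String) :
    ((pvStepAT ht p).getD t PySem.Dict.empty).getD f 0
      = (ht.getD t PySem.Dict.empty).getD f 0 + (if (t, f) = p then 1 else 0) := by
  unfold pvStepAT
  by_cases hT : t = p.1
  · subst hT
    rw [PySem.Dict.getD_insert_self]
    by_cases hF : f = p.2
    · subst hF
      rw [PySem.Dict.getD_insert_self, pvG2_getD_self]
      simp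
    · rw [PySem.Dict.getD_insert_of_ne _ _ _ hF, pvG2_getD_self]
      have hne : ¬ (p.1, f) = p := fun he => hF (congrArg Prod.snd he)
      rw [if_neg hne, add_zero]
  · have hne : ¬ (t, f) = p := fun he => hT (congrArg Prod.fst he)
    rw [PySem.Dict.getD_insert_of_ne _ _ _ hT, pvG2_getD_ne _ _ _ hT, if_neg hne, add_zero]

-- ---- fold-level characterisations of A ----

theorem pvKeysAF (l : List (String × String)) (hf : PySem.Dict String (PySem.Dict String Int)) :
    (l.foldl pvStepAF hf).keys = PySem.Set.update hf.keys (l.map Prod.snd) := by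
  induction l generalizing hf with
  | nil => rfl
  | cons p rest ih =>
    rw [List.foldl_cons, ih, List.map_cons,
      show PySem.Set.update hf.keys (p.2 :: rest.map Prod.snd)
         = PySem.Set.update (PySem.Set.add hf.keys p.2) (rest.map Prod.snd) from rfl,
      pvKeysStepAF]

theorem pvKeysAT (l : List (String × String)) (ht : PySem.Dict String (PySem.Dict String Int)) :
    (l.foldl pvStepAT ht).keys = PySem.Set.update ht.keys (l.map Prod.fst) := by
  induction l generalizing ht with
  | nil => rfl
  | cons p rest ih =>
    rw [List.foldl_cons, ih, List.map_cons,
      show PySem.Set.update ht.keys (p.1 :: rest.map Prod.fst)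
         = PySem.Set.update (PySem.Set.add ht.keys p.1) (rest.map Prod.fst) from rfl,
      pvKeysStepAT]

-- the nested-dict lookup of A counts occurrences of the (table, food) pair
theorem pvCountAT (l : List (String × String)) (ht : PySem.Dict String (PySem.Dict String Int))
    (t f : String) :
    ((l.foldl pvStepAT ht).getD t PySem.Dict.empty).getD f 0
      = (ht.getD t PySem.Dict.empty).getD f 0 + (l.count (t, f) : Int) := by
  induction l generalizing ht with
  | nil => simp
  | cons p rest ih =>
    rw [List.foldl_cons, ih, pvCountStepAT, List.count_cons]
    by_cases hp : (t, f) = p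
    · have hb : (p == (t, f)) = true := by simp [hp.symm]
      rw [hb, if_pos hp]
      simp
      ring
    · have hb : (p == (t, f)) = false := by
        simp only [beq_eq_false_iff_ne, ne_eq]
        exact fun he => hp he.symm
      rw [hb, if_neg hp]
      push_cast
      ring

-- A's cell rendering equals str of the total (getD ∘ getD) lookup
theorem pvCellA (d : PySem.Dict String (PySem.Dict String Int)) (c f : String) :
    (match d.get? c with
     | none => "0"
     | some dd => if dd.contains f then PySem.Int.toStr (dd.getD f 0) else "0")
      = PySem.Int.toStr ((d.getD c PySem.Dict.empty).getD f 0) := by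
  cases hg : d.get? c with
  | none =>
    have h0 : d.getD c PySem.Dict.empty = PySem.Dict.empty := by
      simp [PySem.Dict.getD_eq_get?_getD, hg]
    rw [h0, PySem.Dict.getD_empty]
    rfl
  | some dd =>
    have h0 : d.getD c PySem.Dict.empty = dd := by
      simp [PySem.Dict.getD_eq_get?_getD, hg]
    rw [h0]
    by_cases hc : dd.contains f
    · simp [hc]
    · rw [PySem.Dict.getD_of_not_contains _ _ (by simpa using hc)]
      simp [hc]
      rfl

-- ---- B-side characterisations ----

-- under Pre_, the projected pairs are exactly what B's getD-unpacking reads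
theorem pvPairs_of_pre (orders : List (List String))
    (h3 : ∀ o ∈ orders, o.length = 3) :
    pvPairsOf orders = orders.map (fun o => (o.getD 1 "", o.getD 2 "")) := by
  induction orders with
  | nil => rfl
  | cons o rest ih =>
    have ho := h3 o (by simp)
    rcases o with _ | ⟨a, _ | ⟨b, _ | ⟨c, _ | ⟨d, l⟩⟩⟩⟩ <;> simp_all [pvPairsOf]

-- B's grouping fold over orders = the pair-level fold over the projected pairs
theorem pvGroupFold (orders : List (List String))
    (st : PySem.Dict String (List String) × List String) :
    orders.foldl pvGroupStep st
      = (orders.map (fun o => (o.getD 1 "", o.getD 2 ""))).foldl pvGroupStepP st := by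
  rw [List.foldl_map]
  rfl

-- invariant characterisation of B's grouping fold
theorem pvGroupChar (l : List (String × String)) (d : PySem.Dict String (List String))
    (ts : List String) (hk : d.keys = ts) :
    (l.foldl pvGroupStepP (d, ts)).2 = PySem.Set.update ts (l.map Prod.fst)
    ∧ ∀ t, (l.foldl pvGroupStepP (d, ts)).1.getD t []
        = d.getD t [] ++ (l.filter (fun p => p.1 == t)).map Prod.snd := by
  induction l generalizing d ts with
  | nil => simp
  | cons p rest ih =>
    by_cases h : d.contains p.1
    · have hstep : pvGroupStepP (d, ts) p
          = (d.insert p.1 (d.getD p.1 [] ++ [p.2]), ts) := by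
        simp [pvGroupStepP, h]
      have hk' : (d.insert p.1 (d.getD p.1 [] ++ [p.2])).keys = ts := by
        rw [PySem.Dict.keys_insert_of_contains _ _ h, hk]
      obtain ⟨h1, h2⟩ := ih _ _ hk'
      constructor
      · rw [List.foldl_cons, hstep, h1, List.map_cons]
        have : PySem.Set.add ts p.1 = ts := by
          rw [← hk]; exact pvSetAdd_keys_of_contains _ _ h
        rw [show PySem.Set.update ts (p.1 :: rest.map Prod.fst)
             = PySem.Set.update (PySem.Set.add ts p.1) (rest.map Prod.fst) from rfl, this]
      · intro t
        rw [List.foldl_cons, hstep, h2 t, List.filter_cons]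
        by_cases hT : p.1 = t
        · subst hT
          rw [PySem.Dict.getD_insert_self]
          simp
        · rw [PySem.Dict.getD_insert_of_ne _ _ _ (fun he => hT he.symm)]
          simp [hT]
    · have hGetNil : d.getD p.1 [] = [] :=
        PySem.Dict.getD_of_not_contains _ _ (by simpa using h)
      have hstep : pvGroupStepP (d, ts) p
          = ((d.insert p.1 []).insert p.1 ([] ++ [p.2]), ts ++ [p.1]) := by
        simp [pvGroupStepP, h, PySem.Dict.getD_insert_self]
      have hk' : ((d.insert p.1 []).insert p.1 ([] ++ [p.2])).keys = ts ++ [p.1] := by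
        rw [PySem.Dict.keys_insert_of_contains _ _ (PySem.Dict.contains_insert_self _ _ _),
          PySem.Dict.keys_insert_of_not_contains _ _ (by simpa using h), hk]
      obtain ⟨h1, h2⟩ := ih _ _ hk'
      constructor
      · rw [List.foldl_cons, hstep, h1, List.map_cons]
        have : PySem.Set.add ts p.1 = ts ++ [p.1] := by
          rw [← hk]; exact pvSetAdd_keys_of_not_contains _ _ h
        rw [show PySem.Set.update ts (p.1 :: rest.map Prod.fst)
             = PySem.Set.update (PySem.Set.add ts p.1) (rest.map Prod.fst) from rfl, this]
      · intro t
        rw [List.foldl_cons, hstep, h2 t, List.filter_cons]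
        by_cases hT : p.1 = t
        · subst hT
          simp [PySem.Dict.getD_insert_self, hGetNil]
        · rw [PySem.Dict.getD_insert_of_ne _ _ _ (fun he => hT he.symm),
            PySem.Dict.getD_insert_of_ne _ _ _ (fun he => hT he.symm)]
          simp [hT]

-- counting in a table's group list = counting the pair in the whole pair list
theorem pvCountFilter (l : List (String × String)) (t f : String) :
    ((l.filter (fun p => p.1 == t)).map Prod.snd).count f = l.count (t, f) := by
  induction l with
  | nil => rfl
  | cons p rest ih =>
    rw [List.filter_cons, List.count_cons]
    by_cases hT : p.1 = t
    · by_cases hF : p.2 = f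
      · have hp : p = (t, f) := by rw [← hT, ← hF]
        simp [hp, ih]
      · have hp : ¬ (p == (t, f)) = true := by
          simp only [beq_iff_eq, Prod.ext_iff]
          exact fun hpe => hF hpe.2
        simp [hT, hF, hp, ih]
    · have hp : ¬ (p == (t, f)) = true := by
        simp only [beq_iff_eq, Prod.ext_iff]
        exact fun hpe => hT hpe.1
      simp [hT, hp, ih]

-- after the dropWhile of a run, everything is strictly above food
theorem pvRun (food : String) (fs : List String)
    (hfs : fs.Pairwise (· ≤ ·)) (hmem : ∀ x ∈ fs, x = food ∨ food < x) :
    ∀ x ∈ fs.dropWhile (fun y => y == food), food < x := by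
  induction fs with
  | nil => intro x hx; simp at hx
  | cons a t ih =>
    rw [List.pairwise_cons] at hfs
    by_cases ha : a = food
    · rw [List.dropWhile_cons_of_pos (by simp [ha])]
      exact ih hfs.2 (fun x hx => hmem x (by simp [hx]))
    · rw [List.dropWhile_cons_of_neg (by simp [ha])]
      have hfa : food < a := by
        rcases hmem a (by simp) with h | h
        · exact absurd h ha
        · exact h
      intro x hx
      rcases List.mem_cons.1 hx with rfl | hx
      · exact hfa
      · exact lt_of_lt_of_le hfa (hfs.1 x hx)

-- merge-counting a sorted group against the strictly-sorted food list yields the counts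
theorem pvMerge (foods fs : List String)
    (hfs : fs.Pairwise (· ≤ ·))
    (hfoods : foods.Pairwise (· < ·))
    (hsub : ∀ x ∈ fs, x ∈ foods) :
    pvMergeRow foods fs = foods.map (fun f => PySem.Int.toStr ((fs.count f : Int))) := by
  induction foods generalizing fs with
  | nil => rfl
  | cons food rest ih =>
    rw [List.pairwise_cons] at hfoods
    have htw : ∀ x ∈ fs.takeWhile (fun y => y == food), x = food := by
      intro x hx
      simpa using List.mem_takeWhile_imp hx
    have hdw := pvRun food fs hfs (fun x hx => by
      rcases List.mem_cons.1 (hsub x hx) with rfl | hr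
      · exact Or.inl rfl
      · exact Or.inr (hfoods.1 x hr))
    have hsplit : fs = fs.takeWhile (fun y => y == food) ++ fs.dropWhile (fun y => y == food) :=
      (List.takeWhile_append_dropWhile).symm
    have hcount : fs.count food = (fs.takeWhile (fun y => y == food)).length := by
      conv_lhs => rw [hsplit]
      rw [List.count_append]
      have h1 : (fs.takeWhile (fun y => y == food)).count food
          = (fs.takeWhile (fun y => y == food)).length :=
        List.count_eq_length.2 (fun b hb => by rw [htw b hb])
      have h2 : (fs.dropWhile (fun y => y == food)).count food = 0 :=
        List.count_eq_zero.2 (fun hmem => absurd (hdw food hmem) (lt_irrefl food))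
      rw [h1, h2, add_zero]
    have hsub' : ∀ x ∈ fs.dropWhile (fun y => y == food), x ∈ rest := by
      intro x hx
      rcases List.mem_cons.1 (hsub x ((List.dropWhile_sublist _).mem hx)) with rfl | hr
      · exact absurd (hdw x hx) (lt_irrefl x)
      · exact hr
    have hfs' : (fs.dropWhile (fun y => y == food)).Pairwise (· ≤ ·) :=
      hfs.sublist (List.dropWhile_sublist _)
    rw [pvMergeRow, List.map_cons, ih _ hfs' hfoods.2 hsub', hcount]
    refine congrArg₂ _ rfl (List.map_congr_left ?_)
    intro f hf
    have hfne : food < f := hfoods.1 f hf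
    have : fs.count f = (fs.dropWhile (fun y => y == food)).count f := by
      conv_lhs => rw [hsplit]
      rw [List.count_append]
      have h1 : (fs.takeWhile (fun y => y == food)).count f = 0 :=
        List.count_eq_zero.2 (fun hmem => absurd (htw f hmem) (fun he => absurd (he ▸ hfne) (lt_irrefl _)))
      rw [h1, zero_add]
    rw [this]

-- main equality under Pre_
theorem displayTable_main (orders : List (List String))
    (hpre : Pre_displayTable orders) :
    displayTable orders = displayTable_alt orders := by
  have h3 : ∀ o ∈ orders, o.length = 3 := by
    intro o ho
    unfold Pre_displayTable at hpre
    rw [List.all_eq_true] at hpre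
    have := hpre o ho
    simp only [Bool.and_eq_true, beq_iff_eq] at this
    exact this.1
  simp only [displayTable, displayTable_alt]
  rw [pvFoldA, pvGroupFold, ← pvPairs_of_pre orders h3]
  dsimp only
  obtain ⟨hTs, hGrp⟩ := pvGroupChar (pvPairsOf orders) PySem.Dict.empty [] rfl
  rw [pvKeysAF, pvKeysAT, hTs]
  have hfoods : orders.map (fun o => o.getD 2 "") = (pvPairsOf orders).map Prod.snd := by
    rw [pvPairs_of_pre orders h3, List.map_map]
    rfl
  rw [hfoods]
  have hSetEq : PySem.Set.update (PySem.Dict.empty : PySem.Dict String (PySem.Dict String Int)).keys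
      ((pvPairsOf orders).map Prod.snd)
      = PySem.Set.ofList ((pvPairsOf orders).map Prod.snd) := rfl
  have hSetEq2 : PySem.Set.update ((PySem.Dict.empty : PySem.Dict String (PySem.Dict String Int)).keys)
      ((pvPairsOf orders).map Prod.fst) = PySem.Set.update [] ((pvPairsOf orders).map Prod.fst) := rfl
  rw [hSetEq, hSetEq2]
  congr 1
  congr 1
  funext c
  congr 1
  -- row bodies: A's dict-lookup cells = B's merge-counted cells
  set l := pvPairsOf orders with hl
  set S := PySem.List.sorted (PySem.Set.ofList (l.map Prod.snd)) (fun x => x) false with hS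
  have hfsSorted : (PySem.List.sorted ((l.foldl pvGroupStepP (PySem.Dict.empty, [])).1.getD c [])
      (fun x => x) false).Pairwise (· ≤ ·) := by
    have := PySem.List.sorted_pairwise ((l.foldl pvGroupStepP (PySem.Dict.empty, [])).1.getD c [])
      (fun x => x) (κ := String)
    simpa using this
  have hSlt : S.Pairwise (· < ·) := PySem.List.sorted_ofList_pairwise_lt _
  have hsub : ∀ x ∈ PySem.List.sorted ((l.foldl pvGroupStepP (PySem.Dict.empty, [])).1.getD c [])
      (fun x => x) false, x ∈ S := by
    intro x hx
    rw [PySem.List.mem_sorted] at hx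
    rw [hGrp c] at hx
    simp only [PySem.Dict.getD_empty, List.nil_append] at hx
    rw [hS, PySem.List.mem_sorted, PySem.Set.mem_ofList]
    rcases List.mem_map.1 hx with ⟨p, hp, rfl⟩
    exact List.mem_map.2 ⟨p, (List.mem_filter.1 hp).1, rfl⟩
  rw [pvMerge S _ hfsSorted hSlt hsub]
  rw [List.tail_cons]
  apply List.map_congr_left
  intro f _
  rw [pvCellA, pvCountAT]
  have hperm := PySem.List.sorted_perm ((l.foldl pvGroupStepP (PySem.Dict.empty, [])).1.getD c [])
    (fun x => x) false
  rw [hperm.count_eq, hGrp c]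
  simp only [PySem.Dict.getD_empty, List.nil_append]
  rw [pvCountFilter]
  simp

-- ===== VERDICT (by name: the statement is the Claim_ definition above) =====
theorem displayTable_spec : Claim_equal_displayTable := by
  intro orders _ hpre
  unfold Spec_displayTable
  exact displayTable_main orders hpre
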